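-- pv_equiv track=rewrite | github.com/hfalan/codaspy19 | code/webpage_fingerprinting_methods/bog/bog.py | get_burst_pairs
-- ===== SOURCE A (Python) =====
-- def get_burst_pairs(packet_size_sequence):
--     direction = -1
--     burst_pairs = []
--     outgoing = 0
--     incoming = 0
--     for size in packet_size_sequence:
--         if size < 0 and direction == 1:
--             burst_pairs.append((outgoing, incoming))
--             outgoing = 0
--             incoming = 0
--             direction = -1
--         if size > 0 and direction == -1:
--             direction = 1
--         if size < 0:
--             outgoing += -1*size
--         else:
--             incoming += size
--     burst_pairs.append((outgoing, incoming))
--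
--     return burst_pairs
-- ===== SOURCE B (Python) =====
-- def get_burst_pairs(packet_size_sequence):
--     # First pass: split the sequence into burst groups; a new group starts when a
--     # negative packet follows a positive one seen in the current group.
--     groups = [[]]
--     seen_pos = False
--     for size in packet_size_sequence:
--         if size < 0 and seen_pos:
--             groups.append([])
--             seen_pos = False
--         if size > 0:
--             seen_pos = True
--         groups[-1].append(size)
--     # Second pass: map each group to (outgoing, incoming) sums.
--     return [(sum(-s for s in g if s < 0), sum(s for s in g if s >= 0)) for g in groups]
-- ===== Notes on version B (the rewrite author's own statement) =====
-- stated objective: alternative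
-- what changed: B splits the sequence into burst groups in a first pass (tracking only 'seen a positive' per group) and then maps each group to its (outgoing, incoming) sums in a second pass, instead of A's single loop with a numeric direction flag and running accumulators.
import Mathlib
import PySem

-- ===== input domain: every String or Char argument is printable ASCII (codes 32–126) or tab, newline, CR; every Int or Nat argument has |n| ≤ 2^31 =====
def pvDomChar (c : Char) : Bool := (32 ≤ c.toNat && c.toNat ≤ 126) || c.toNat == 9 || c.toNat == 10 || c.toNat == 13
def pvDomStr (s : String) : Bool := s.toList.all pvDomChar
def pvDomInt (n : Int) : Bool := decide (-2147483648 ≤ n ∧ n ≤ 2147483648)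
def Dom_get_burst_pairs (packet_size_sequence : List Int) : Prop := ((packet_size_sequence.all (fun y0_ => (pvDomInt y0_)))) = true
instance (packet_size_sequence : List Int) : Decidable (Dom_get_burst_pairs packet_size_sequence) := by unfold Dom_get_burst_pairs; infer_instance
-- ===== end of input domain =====

-- B: split into burst groups in one pass, then map each group to its sums in a second pass (objective: alternative decomposition, same cost).

-- ===== PORT A =====
-- A's single loop: numeric direction flag, running outgoing/incoming accumulators
def pvGoA : List Int → Int → List (Int × Int) → Int → Int → List (Int × Int)
  | [], _, burst_pairs, outgoing, incoming => burst_pairs ++ [(outgoing, incoming)]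
  | size :: rest, direction, burst_pairs, outgoing, incoming =>
    let st : List (Int × Int) × Int × Int × Int :=
      if size < 0 ∧ direction = 1 then (burst_pairs ++ [(outgoing, incoming)], 0, 0, -1)
      else (burst_pairs, outgoing, incoming, direction)
    let dir2 : Int := if size > 0 ∧ st.2.2.2 = -1 then 1 else st.2.2.2
    if size < 0 then pvGoA rest dir2 st.1 (st.2.1 + (-1) * size) st.2.2.1
    else pvGoA rest dir2 st.1 st.2.1 (st.2.2.1 + size)

def get_burst_pairs (packet_size_sequence : List Int) : List (Int × Int) :=
  pvGoA packet_size_sequence (-1) [] 0 0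

-- ===== PORT B =====
-- first pass: split into burst groups (boolean 'seen a positive yet' per group)
def pvGroupsB : List Int → List Int → Bool → List (List Int)
  | [], cur, _ => [cur]
  | size :: rest, cur, seen_pos =>
    if size < 0 ∧ seen_pos = true then cur :: pvGroupsB rest [size] false
    else pvGroupsB rest (cur ++ [size]) (seen_pos || decide (size > 0))

-- second pass: each group to its (outgoing, incoming) sums
def pvPairOf (g : List Int) : Int × Int :=
  (((g.filter (fun s => s < 0)).map (fun s => -s)).sum, (g.filter (fun s => 0 ≤ s)).sum)

def get_burst_pairs_alt (packet_size_sequence : List Int) : List (Int × Int) :=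
  (pvGroupsB packet_size_sequence [] false).map pvPairOf

-- ===== PRECONDITION & SPEC =====
def Spec_get_burst_pairs (packet_size_sequence : List Int) (out : List (Int × Int)) : Prop := out = get_burst_pairs_alt packet_size_sequence
instance (packet_size_sequence : List Int) (out : List (Int × Int)) : Decidable (Spec_get_burst_pairs packet_size_sequence out) := by unfold Spec_get_burst_pairs; infer_instance

-- ===== CLAIM (what is proved, stated in full; the proofs are below) =====
def Claim_equal_get_burst_pairs : Prop := ∀ (packet_size_sequence : List Int), Dom_get_burst_pairs packet_size_sequence → Spec_get_burst_pairs packet_size_sequence (get_burst_pairs packet_size_sequence)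

-- ===== LEMMAS AND PROOFS =====
theorem pvPairOf_append (g : List Int) (s : Int) :
    pvPairOf (g ++ [s]) =
      ((pvPairOf g).1 + (if s < 0 then -s else 0), (pvPairOf g).2 + (if 0 ≤ s then s else 0)) := by
  simp [pvPairOf, List.filter_append]
  constructor <;> split_ifs with h <;> simp [List.filter_singleton, h]

theorem pvGoA_eq_groups (xs : List Int) : ∀ (cur : List Int) (bp : List (Int × Int)) (seen : Bool),
    pvGoA xs (if seen then 1 else -1) bp (pvPairOf cur).1 (pvPairOf cur).2
      = bp ++ (pvGroupsB xs cur seen).map pvPairOf := by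
  induction xs with
  | nil => intro cur bp seen; simp [pvGoA, pvGroupsB]
  | cons s rest ih =>
    intro cur bp seen
    cases seen with
    | true =>
      by_cases hneg : s < 0
      · have h1 : ¬ s > 0 := by omega
        have hih := ih [s] (bp ++ [pvPairOf cur]) false
        simp only [Bool.false_eq_true, if_false] at hih
        have hs : pvPairOf [s] = (-s, 0) := by
          simp [pvPairOf, hneg, show ¬ (0:Int) ≤ s by omega]
        rw [hs] at hih
        simp [pvGoA, pvGroupsB, hneg, h1]
        simpa using hih
      · have h0 : (0:Int) ≤ s := by omega
        have hih := ih (cur ++ [s]) bp true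
        rw [pvPairOf_append] at hih
        simp only [if_neg hneg, if_pos h0, if_true] at hih
        simp [pvGoA, pvGroupsB, hneg]
        simpa using hih
    | false =>
      by_cases hneg : s < 0
      · have h1 : ¬ s > 0 := by omega
        have hih := ih (cur ++ [s]) bp (false || decide (s > 0))
        rw [pvPairOf_append] at hih
        simp only [if_pos hneg, if_neg (show ¬ (0:Int) ≤ s by omega), h1, decide_false,
          Bool.false_or, Bool.false_eq_true, if_false, add_zero] at hih
        simp [pvGoA, pvGroupsB, hneg, h1]
        simpa [neg_one_mul] using hih
      · have h0 : (0:Int) ≤ s := by omega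
        have hih := ih (cur ++ [s]) bp (false || decide (s > 0))
        rw [pvPairOf_append] at hih
        simp only [if_neg hneg, if_pos h0, Bool.false_or] at hih
        by_cases hpos : s > 0
        · simp only [hpos, decide_true, if_true] at hih
          simp [pvGoA, pvGroupsB, hneg, hpos]
          simpa using hih
        · simp only [hpos, decide_false, Bool.false_eq_true, if_false] at hih
          simp [pvGoA, pvGroupsB, hneg, hpos]
          simpa using hih

-- ===== VERDICT (by name: the statement is the Claim_ definition above) =====
theorem get_burst_pairs_spec : Claim_equal_get_burst_pairs := by
  intro xs _
  show get_burst_pairs xs = get_burst_pairs_alt xs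
  have h := pvGoA_eq_groups xs [] [] false
  simpa [get_burst_pairs, get_burst_pairs_alt, pvPairOf] using h
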